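-- pv_equiv track=rewrite | github.com/ArtemisMucaj/thefac-sengine | elastic_interface.py | miner_lineIsNumeric
-- ===== SOURCE A (Python) =====
-- def miner_lineIsNumeric(line):
--     chars = list(line)
--     cpt_numeric = 0
--     cpt_other = 0
--     for x in range(0,len(chars)):
--         if chars[x].isdigit():
--             cpt_numeric += 1
--         elif chars[x] != " ":
--             cpt_other += 1
--         pass
--     if cpt_numeric > cpt_other:
--         return True
--     else:
--         return False
-- ===== SOURCE B (Python) =====
-- def miner_lineIsNumeric(line):
--     # Divide-and-conquer signed balance: +1 per digit, -1 per non-space non-digit,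
--     # 0 per space; digits outnumber the others exactly when the balance is positive.
--     def bal(s):
--         n = len(s)
--         if n == 0:
--             return 0
--         if n == 1:
--             return 1 if s.isdigit() else (0 if s == " " else -1)
--         m = n // 2
--         return bal(s[:m]) + bal(s[m:])
--     return bal(line) > 0
-- ===== Notes on version B (the rewrite author's own statement) =====
-- stated objective: alternative
-- what changed: Replaces A's indexed single pass with two counters by a divide-and-conquer recursion computing one signed balance (+1 digit, -1 non-space non-digit) over string halves and testing positivity.
import Mathlib
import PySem

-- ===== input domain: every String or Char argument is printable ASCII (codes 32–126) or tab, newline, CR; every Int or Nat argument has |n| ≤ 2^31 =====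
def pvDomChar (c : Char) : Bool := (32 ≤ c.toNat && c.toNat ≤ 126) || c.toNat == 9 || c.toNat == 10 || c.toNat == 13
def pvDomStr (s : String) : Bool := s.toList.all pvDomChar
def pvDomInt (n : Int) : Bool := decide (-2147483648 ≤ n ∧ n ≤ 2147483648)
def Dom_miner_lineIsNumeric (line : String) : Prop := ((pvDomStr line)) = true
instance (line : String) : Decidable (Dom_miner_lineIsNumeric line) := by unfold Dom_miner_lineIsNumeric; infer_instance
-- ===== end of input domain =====

-- B replaces A's indexed two-counter loop by a divide-and-conquer recursion computing a
-- single signed balance (+1 digit, -1 non-space non-digit) over halves; objective: alternative.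


-- ===== PORT A =====
def miner_lineIsNumeric (line : String) : Bool :=
  let chars := line.toList
  let s := (PySem.List.pyRange 0 (PySem.List.len chars)).foldl
    (fun (acc : Int × Int) x =>
      if PySem.Chars.isdigit (PySem.List.pyGetD chars x ' ') then (acc.1 + 1, acc.2)
      else if PySem.List.pyGetD chars x ' ' ≠ ' ' then (acc.1, acc.2 + 1)
      else acc) (0, 0)
  if s.1 > s.2 then true else false

-- ===== PORT B =====
-- bal(s): length-0/1 base cases, otherwise the sum of the balances of the two halves
-- (s[:m] = take m, s[m:] = drop m; s.isdigit() on the 1-char piece = Chars.strIsdigit)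
def pvBal (s : List Char) : Int :=
  if s.length = 0 then 0
  else if s.length = 1 then
    (if PySem.Chars.strIsdigit s then 1 else if s = [' '] then 0 else -1)
  else pvBal (s.take (s.length / 2)) + pvBal (s.drop (s.length / 2))
termination_by s.length
decreasing_by
  · simp only [List.length_take]; omega
  · simp only [List.length_drop]; omega

def miner_lineIsNumeric_alt (line : String) : Bool :=
  decide (pvBal line.toList > 0)

-- ===== PRECONDITION & SPEC =====
def Spec_miner_lineIsNumeric (line : String) (out : Bool) : Prop := out = miner_lineIsNumeric_alt line
instance (line : String) (out : Bool) : Decidable (Spec_miner_lineIsNumeric line out) := by unfold Spec_miner_lineIsNumeric; infer_instance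

-- ===== CLAIM (what is proved, stated in full; the proofs are below) =====
def Claim_equal_miner_lineIsNumeric : Prop := ∀ (line : String), Dom_miner_lineIsNumeric line → Spec_miner_lineIsNumeric line (miner_lineIsNumeric line)

-- ===== LEMMAS AND PROOFS =====

-- A's loop computes the two classifying counts
theorem pv_loopA (cs : List Char) : ∀ (n o : Int),
    cs.foldl (fun (acc : Int × Int) c =>
      if PySem.Chars.isdigit c then (acc.1 + 1, acc.2)
      else if c ≠ ' ' then (acc.1, acc.2 + 1)
      else acc) (n, o)
    = (n + (cs.countP (fun c => PySem.Chars.isdigit c) : Int),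
       o + (cs.countP (fun c => !PySem.Chars.isdigit c && !(c == ' ')) : Int)) := by
  induction cs with
  | nil => intro n o; simp
  | cons c t ih =>
      intro n o
      simp only [List.foldl_cons]
      by_cases hd : PySem.Chars.isdigit c = true
      · rw [if_pos hd, ih]
        simp [hd, Prod.ext_iff]
        omega
      · by_cases hs : c = ' '
        · subst hs
          rw [if_neg hd, if_neg (by simp), ih]
          simp [hd]
        · rw [if_neg hd, if_pos hs, ih]
          simp [hd, hs, Prod.ext_iff]
          omega

-- B's balance is the digit count minus the non-space non-digit count
theorem pvBal_eq (s : List Char) :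
    pvBal s = (s.countP (fun c => PySem.Chars.isdigit c) : Int)
      - (s.countP (fun c => !PySem.Chars.isdigit c && !(c == ' ')) : Int) := by
  induction s using pvBal.induct with
  | case1 s h0 =>
      have : s = [] := List.length_eq_zero_iff.mp h0
      subst this; simp [pvBal]
  | case2 s h0 h1 hd =>
      obtain ⟨c, rfl⟩ := List.length_eq_one_iff.mp h1
      simp only [PySem.Chars.strIsdigit, List.isEmpty_cons, List.all_cons, List.all_nil,
        Bool.not_false, Bool.true_and, Bool.and_true] at hd
      simp [pvBal, PySem.Chars.strIsdigit, hd]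
  | case3 h0 h1 hd =>
      simp only [PySem.Chars.strIsdigit] at hd
      simp [pvBal, PySem.Chars.strIsdigit] at hd ⊢
      simp [hd]
  | case4 s h0 h1 hd hs =>
      obtain ⟨c, rfl⟩ := List.length_eq_one_iff.mp h1
      simp only [PySem.Chars.strIsdigit] at hd
      have hd' : PySem.Chars.isdigit c = false := by
        rcases Bool.eq_false_or_eq_true (PySem.Chars.isdigit c) with h | h
        · exact absurd (by simp [h]) hd
        · exact h
      have hs' : ¬ c = ' ' := by intro h; exact hs (by rw [h])
      simp [pvBal, PySem.Chars.strIsdigit, hd', hs', hs]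
  | case5 s h0 h1 ih1 ih2 =>
      rw [pvBal, if_neg h0, if_neg h1, ih1, ih2]
      have := List.take_append_drop (s.length / 2) s
      conv_rhs => rw [← this]
      simp only [List.countP_append]
      push_cast
      ring

-- ===== VERDICT (by name: the statement is the Claim_ definition above) =====
theorem miner_lineIsNumeric_spec : Claim_equal_miner_lineIsNumeric := by
  intro line _
  have key := PySem.List.foldl_pyRange_pyGetD line.toList ' '
      (fun (acc : Int × Int) c =>
        if PySem.Chars.isdigit c then (acc.1 + 1, acc.2)
        else if c ≠ ' ' then (acc.1, acc.2 + 1)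
        else acc) ((0 : Int), (0 : Int)) le_rfl
  simp only [Int.toNat_zero, List.drop_zero, pv_loopA, zero_add] at key
  unfold Spec_miner_lineIsNumeric miner_lineIsNumeric miner_lineIsNumeric_alt
  dsimp only
  rw [key, pvBal_eq]
  by_cases hlt : ((line.toList.countP (fun c => !PySem.Chars.isdigit c && !(c == ' '))) : Int)
      < ((line.toList.countP (fun c => PySem.Chars.isdigit c)) : Int)
  · rw [if_pos hlt]
    symm
    rw [decide_eq_true_iff]
    omega
  · rw [if_neg hlt]
    symm
    rw [decide_eq_false_iff_not]
    omega
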